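-- pv_equiv track=rewrite | github.com/SofiiaBobr/Python_Logos | homework_7/decorator.py | createSecondDict
-- ===== SOURCE A (Python) =====
-- def listArg(d):
--     h = []
--     for i in range(0, len(d)):
--         h.append(str(i)+" arg")
--     return h
--
-- def createSecondDict(a):
--     dictss = {}
--     r = listArg(a)
--     h = *r,
--     c = a.items()
--     x = *c,
--     for i in range(0, len(a)):
--         dictss[h[i]] = x[i]
--     return dictss
-- ===== SOURCE B (Python) =====
-- def createSecondDict(a):
--     stack = list(a.items())
--     stack.reverse()
--     result = {}
--     i = 0
--     while stack:
--         result[f"{i} arg"] = stack.pop()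
--         i += 1
--     return result
-- ===== Notes on version B (the rewrite author's own statement) =====
-- stated objective: alternative
-- what changed: B drops A's staged materializations (a parallel list of 'i arg' labels, a tuple of items, and a positional range-index join) and instead reverses the item list once and consumes it destructively as a stack (pop from the end) while counting up the label index.
import Mathlib
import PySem

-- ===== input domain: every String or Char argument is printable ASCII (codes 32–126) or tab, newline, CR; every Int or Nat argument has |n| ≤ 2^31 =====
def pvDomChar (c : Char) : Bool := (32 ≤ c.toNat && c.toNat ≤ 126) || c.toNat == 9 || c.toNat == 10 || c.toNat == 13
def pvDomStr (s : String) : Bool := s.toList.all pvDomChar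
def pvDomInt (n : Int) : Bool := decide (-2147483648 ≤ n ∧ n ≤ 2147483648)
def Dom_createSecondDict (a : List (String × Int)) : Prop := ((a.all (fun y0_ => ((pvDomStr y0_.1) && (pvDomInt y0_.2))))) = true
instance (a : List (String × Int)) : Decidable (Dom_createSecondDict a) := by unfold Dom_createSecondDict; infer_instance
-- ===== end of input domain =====

-- B replaces A's parallel label list / items tuple / range-index join by a reversed stack consumed by pop (alternative decomposition; return value only).

-- ===== PORT A =====
def pvListArg (d : List (String × Int)) : List String :=
  (PySem.List.pyRange 0 (PySem.List.len d) 1).foldl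
    (fun h i => h ++ [PySem.Int.toStr i ++ " arg"]) []

def createSecondDict (a : List (String × Int)) : List (String × String × Int) :=
  let r := pvListArg a
  let h := r                 -- h = *r,
  let x := a                 -- c = a.items(); x = *c,
  let dictss : PySem.Dict String (String × Int) :=
    (PySem.List.pyRange 0 (PySem.List.len a) 1).foldl
      (fun d i => d.insert (PySem.List.pyGetD h i "") (PySem.List.pyGetD x i ("", 0)))
      PySem.Dict.empty
  dictss.items

-- ===== PORT B =====
-- while stack: result[f"{i} arg"] = stack.pop(); i += 1   (pop takes the LAST element)
def pvPopLoop (stack : List (String × Int)) (i : Int)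
    (result : PySem.Dict String (String × Int)) : PySem.Dict String (String × Int) :=
  match _h : stack.getLast? with
  | none => result
  | some p =>
      pvPopLoop stack.dropLast (i + 1) (result.insert (PySem.Int.toStr i ++ " arg") p)
termination_by stack.length
decreasing_by
  have hne : stack ≠ [] := by intro hnil; simp [hnil] at _h
  have hpos : 0 < stack.length := List.length_pos_of_ne_nil hne
  simp only [List.length_dropLast]
  omega

def createSecondDict_alt (a : List (String × Int)) : List (String × String × Int) :=
  let stack := a.reverse
  (pvPopLoop stack 0 PySem.Dict.empty).items

-- ===== PRECONDITION & SPEC =====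
def Spec_createSecondDict (a : List (String × Int)) (out : List (String × String × Int)) : Prop := out = createSecondDict_alt a
instance (a : List (String × Int)) (out : List (String × String × Int)) : Decidable (Spec_createSecondDict a out) := by unfold Spec_createSecondDict; infer_instance

-- ===== CLAIM (what is proved, stated in full; the proofs are below) =====
def Claim_equal_createSecondDict : Prop := ∀ (a : List (String × Int)), Dom_createSecondDict a → Spec_createSecondDict a (createSecondDict a)

-- ===== LEMMAS AND PROOFS =====
theorem pvListArg_eq_map (d : List (String × Int)) :
    pvListArg d = (PySem.List.pyRange 0 (PySem.List.len d) 1).map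
      (fun i => PySem.Int.toStr i ++ " arg") := by
  simpa [pvListArg] using
    PySem.List.foldl_append_singleton_eq_map
      (fun i => PySem.Int.toStr i ++ " arg")
      (PySem.List.pyRange 0 (PySem.List.len d) 1) []

-- popping through l.reverse visits l front to back: the pop loop is the enumerate fold
theorem pvPopLoop_reverse (l : List (String × Int)) :
    ∀ (i : Int) (acc : PySem.Dict String (String × Int)),
      pvPopLoop l.reverse i acc
        = (PySem.List.enumerate l i).foldl
            (fun d p => d.insert (PySem.Int.toStr p.1 ++ " arg") p.2) acc := by
  induction l with
  | nil => intro i acc; rw [pvPopLoop]; simp [PySem.List.enumerate_nil]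
  | cons x xs ih =>
      intro i acc
      rw [pvPopLoop]
      split
      · rename_i hnone
        simp at hnone
      · rename_i p hp
        have hx : p = x := by
          have : ((x :: xs).reverse).getLast? = some x := by simp
          rw [this] at hp
          exact (Option.some_inj.mp hp).symm
        have h2 : (x :: xs).reverse.dropLast = xs.reverse := by simp
        rw [hx, h2, ih, PySem.List.enumerate_cons, List.foldl_cons]

theorem createSecondDict_eq_alt (a : List (String × Int)) :
    createSecondDict a = createSecondDict_alt a := by
  simp only [createSecondDict, createSecondDict_alt]
  rw [pvPopLoop_reverse a 0 PySem.Dict.empty,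
    PySem.List.enumerate_eq_map_pyRange a ("", (0 : Int)), List.foldl_map,
    pvListArg_eq_map]
  congr 1
  apply PySem.List.foldl_congr_mem
  intro d i hi
  have hmem := (PySem.List.mem_pyRange_one).mp hi
  rw [PySem.List.pyGetD_map_pyRange_of_nonneg _ _ _ _ hmem.1 hmem.2]

-- ===== VERDICT (by name: the statement is the Claim_ definition above) =====
theorem createSecondDict_spec : Claim_equal_createSecondDict := by
  intro a _
  unfold Spec_createSecondDict
  exact createSecondDict_eq_alt a
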